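-- pv_equiv track=rewrite | github.com/ATDBC/Arknights-Endfield-Puzzle-Detector-and-Solver | detect.py | cells_to_shape
-- ===== SOURCE A (Python) =====
-- from typing import Dict, List, Optional, Set, Tuple
--
-- def cells_to_shape(cells: Set[Tuple[int, int]]) -> List[List[int]]:
--     if not cells:
--         return [[1, 1], [1, 1]]
--     min_r = min(r for r, _ in cells)
--     min_c = min(c for _, c in cells)
--     norm = {(r - min_r, c - min_c) for r, c in cells}
--     h = max(r for r, _ in norm) + 1
--     w = max(c for _, c in norm) + 1
--     out = [[0 for _ in range(w)] for _ in range(h)]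
--     for r, c in norm:
--         out[r][c] = 1
--     return out
-- ===== SOURCE B (Python) =====
-- def cells_to_shape(cells):
--     if not cells:
--         return [[1, 1], [1, 1]]
--     it = iter(cells)
--     r0, c0 = next(it)
--     min_r = max_r = r0
--     min_c = max_c = c0
--     for r, c in it:
--         if r < min_r: min_r = r
--         if r > max_r: max_r = r
--         if c < min_c: min_c = c
--         if c > max_c: max_c = c
--     return [[1 if (r + min_r, c + min_c) in cells else 0
--              for c in range(max_c - min_c + 1)]
--             for r in range(max_r - min_r + 1)]
-- ===== Notes on version B (the rewrite author's own statement) =====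
-- stated objective: idiomatic
-- what changed: Instead of building a normalized shifted set, zero-initializing a grid and scattering 1s by looping over the cells, B finds the bounding box (min and max of both coordinates) in a single pass and then gathers the grid directly: it iterates over every output position (r, c) and tests membership of the shifted coordinate in the original set.
import Mathlib
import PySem

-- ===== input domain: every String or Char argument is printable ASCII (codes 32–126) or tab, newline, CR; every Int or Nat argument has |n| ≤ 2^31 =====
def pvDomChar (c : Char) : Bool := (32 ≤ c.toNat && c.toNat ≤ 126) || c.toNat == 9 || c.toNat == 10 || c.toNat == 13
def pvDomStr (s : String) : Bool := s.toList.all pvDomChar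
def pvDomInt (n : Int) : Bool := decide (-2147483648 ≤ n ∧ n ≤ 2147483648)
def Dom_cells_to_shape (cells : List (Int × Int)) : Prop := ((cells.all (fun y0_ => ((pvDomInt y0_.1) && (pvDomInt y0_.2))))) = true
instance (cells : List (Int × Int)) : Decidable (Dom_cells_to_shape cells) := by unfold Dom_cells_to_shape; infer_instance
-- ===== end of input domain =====

-- B replaces A's normalize-then-scatter construction (shifted set, zero grid, 1s written
-- at each cell) by a one-pass bounding-box computation followed by a direct gather:
-- every grid position tests membership of its shifted coordinate in the input (idiomatic).

-- ===== PORT A =====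
-- out[r][c] = v; A only reaches indices with 0 ≤ r < len(out), 0 ≤ c < len(out[r]),
-- where this is exactly Python's assignment
def pvSetCell (g : List (List Int)) (r c v : Int) : List (List Int) :=
  g.modify r.toNat (fun row => row.set c.toNat v)

def cells_to_shape (cells : List (Int × Int)) : List (List Int) :=
  if cells = [] then [[1, 1], [1, 1]]
  else
    let min_r := (PySem.List.min? (cells.map Prod.fst) (fun x => x)).getD 0
    let min_c := (PySem.List.min? (cells.map Prod.snd) (fun x => x)).getD 0
    let norm := PySem.Set.ofList (cells.map (fun q => (q.1 - min_r, q.2 - min_c)))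
    let h := (PySem.List.max? (norm.map Prod.fst) (fun x => x)).getD 0 + 1
    let w := (PySem.List.max? (norm.map Prod.snd) (fun x => x)).getD 0 + 1
    let out := (PySem.List.pyRange 0 h 1).map (fun _ => (PySem.List.pyRange 0 w 1).map (fun _ => (0 : Int)))
    norm.foldl (fun g q => pvSetCell g q.1 q.2 1) out

-- ===== PORT B =====
def cells_to_shape_alt (cells : List (Int × Int)) : List (List Int) :=
  match cells with
  | [] => [[1, 1], [1, 1]]
  | p :: rest =>
    let bb := rest.foldl
      (fun (s : Int × Int × Int × Int) q =>
        (min s.1 q.1, max s.2.1 q.1, min s.2.2.1 q.2, max s.2.2.2 q.2))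
      (p.1, p.1, p.2, p.2)
    (List.range (bb.2.1 - bb.1 + 1).toNat).map (fun (r : Nat) =>
      (List.range (bb.2.2.2 - bb.2.2.1 + 1).toNat).map (fun (c : Nat) =>
        if ((r : Int) + bb.1, (c : Int) + bb.2.2.1) ∈ cells then (1 : Int) else 0))

-- ===== PRECONDITION & SPEC =====
def Spec_cells_to_shape (cells : List (Int × Int)) (out : List (List Int)) : Prop := out = cells_to_shape_alt cells
instance (cells : List (Int × Int)) (out : List (List Int)) : Decidable (Spec_cells_to_shape cells out) := by unfold Spec_cells_to_shape; infer_instance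

-- ===== CLAIM (what is proved, stated in full; the proofs are below) =====
def Claim_equal_cells_to_shape : Prop := ∀ (cells : List (Int × Int)), Dom_cells_to_shape cells → Spec_cells_to_shape cells (cells_to_shape cells)

-- ===== LEMMAS AND PROOFS =====

-- entry of a grid, total (0 outside)
def pvE (g : List (List Int)) (i j : Nat) : Int := (g.getD i []).getD j 0

theorem pv_foldl_min_le (l : List Int) (a : Int) : ∀ x ∈ a :: l, l.foldl min a ≤ x := by
  induction l generalizing a with
  | nil => simp
  | cons x t ih =>
    intro y hy
    have h := ih (min a x)
    simp only [List.foldl_cons]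
    rcases List.mem_cons.1 hy with rfl | hy'
    · exact le_trans (h _ (List.mem_cons_self)) (min_le_left _ _)
    · rcases List.mem_cons.1 hy' with rfl | hy''
      · exact le_trans (h _ (List.mem_cons_self)) (min_le_right _ _)
      · exact h y (List.mem_cons_of_mem _ hy'')

theorem pv_le_foldl_max (l : List Int) (a : Int) : ∀ x ∈ a :: l, x ≤ l.foldl max a := by
  induction l generalizing a with
  | nil => simp
  | cons x t ih =>
    intro y hy
    have h := ih (max a x)
    simp only [List.foldl_cons]
    rcases List.mem_cons.1 hy with rfl | hy'
    · exact le_trans (le_max_left _ _) (h _ (List.mem_cons_self))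
    · rcases List.mem_cons.1 hy' with rfl | hy''
      · exact le_trans (le_max_right _ _) (h _ (List.mem_cons_self))
      · exact h y (List.mem_cons_of_mem _ hy'')

theorem pv_foldl_max_mem (l : List Int) (a : Int) : l.foldl max a ∈ a :: l := by
  induction l generalizing a with
  | nil => simp
  | cons x t ih =>
    simp only [List.foldl_cons]
    have h := ih (max a x)
    rcases List.mem_cons.1 h with h | h
    · rcases max_choice a x with hm | hm
      · exact List.mem_cons.2 (Or.inl (h.trans hm))
      · exact List.mem_cons.2 (Or.inr (List.mem_cons.2 (Or.inl (h.trans hm))))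
    · exact List.mem_cons.2 (Or.inr (List.mem_cons.2 (Or.inr h)))

theorem pv_max?_eq_of (xs : List Int) (M : Int) (hM : M ∈ xs)
    (hb : ∀ y ∈ xs, y ≤ M) : (PySem.List.max? xs (fun x => x)).getD 0 = M := by
  have hne : xs ≠ [] := by rintro rfl; simp at hM
  obtain ⟨m, hm⟩ : ∃ m, PySem.List.max? xs (fun x => x) = some m := by
    cases h : PySem.List.max? xs (fun x => x) with
    | none => exact absurd ((PySem.List.max?_eq_none_iff _ _).1 h) hne
    | some m => exact ⟨m, rfl⟩
  have h1 : m ≤ M := hb m (PySem.List.max?_mem hm)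
  have h2 : M ≤ m := PySem.List.max?_isMax hm M hM
  simp [hm, le_antisymm h1 h2]

theorem pv_fold4 (rest : List (Int × Int)) (a b c d : Int) :
    rest.foldl (fun (s : Int × Int × Int × Int) q =>
        (min s.1 q.1, max s.2.1 q.1, min s.2.2.1 q.2, max s.2.2.2 q.2)) (a, b, c, d)
    = ((rest.map Prod.fst).foldl min a, (rest.map Prod.fst).foldl max b,
       (rest.map Prod.snd).foldl min c, (rest.map Prod.snd).foldl max d) := by
  induction rest generalizing a b c d with
  | nil => simp
  | cons q t ih => simp [ih]

theorem pv_setCell_length (g : List (List Int)) (r c v : Int) :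
    (pvSetCell g r c v).length = g.length := by
  simp [pvSetCell]

theorem pv_setCell_rowlen (g : List (List Int)) (r c v : Int) (i : Nat) :
    ((pvSetCell g r c v).getD i []).length = (g.getD i []).length := by
  simp only [pvSetCell, List.getD]
  rw [List.getElem?_modify]
  cases h : g[i]? with
  | none => simp
  | some row => by_cases hri : r.toNat = i <;> simp [hri]

theorem pv_setCell_entry (g : List (List Int)) (r c : Int) (i j : Nat)
    (hr : 0 ≤ r) (hc : 0 ≤ c) :
    pvE (pvSetCell g r c 1) i j =
      if r = (i : Int) ∧ c = (j : Int) ∧ i < g.length ∧ j < (g.getD i []).length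
      then 1 else pvE g i j := by
  simp only [pvE, pvSetCell, List.getD_eq_getElem?_getD]
  rw [List.getElem?_modify]
  cases hg : g[i]? with
  | none =>
    have hlen : ¬ i < g.length := by
      simpa using List.getElem?_eq_none_iff.1 hg
    simp [hlen]
  | some row =>
    have hlen : i < g.length := (List.getElem?_eq_some_iff.1 hg).choose
    by_cases hri : r.toNat = i
    · have hre : r = (i : Int) := by omega
      simp only [hri, ite_true, Option.map_eq_map, Option.map_some, Option.getD_some]
      rw [List.getElem?_set]
      by_cases hcj : c.toNat = j
      · have hce : c = (j : Int) := by omega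
        by_cases hjw : j < row.length
        · simp [hjw, hre, hce, hlen]
        · simp [hjw, hre, hce]
      · have hce : ¬ c = (j : Int) := by omega
        simp [hcj, hce]
    · have hre : ¬ r = (i : Int) := by omega
      simp [hri, hre]

theorem pv_scatter_rowlen (ps : List (Int × Int)) (g : List (List Int)) (i : Nat) :
    ((ps.foldl (fun g q => pvSetCell g q.1 q.2 1) g).getD i []).length
      = (g.getD i []).length := by
  induction ps generalizing g with
  | nil => rfl
  | cons q t ih => rw [List.foldl_cons, ih, pv_setCell_rowlen]

theorem pv_scatter_length (ps : List (Int × Int)) (g : List (List Int)) :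
    (ps.foldl (fun g q => pvSetCell g q.1 q.2 1) g).length = g.length := by
  induction ps generalizing g with
  | nil => rfl
  | cons q t ih => rw [List.foldl_cons, ih, pv_setCell_length]

theorem pv_scatter_entry (ps : List (Int × Int)) (g : List (List Int)) (i j : Nat)
    (hps : ∀ q ∈ ps, 0 ≤ q.1 ∧ 0 ≤ q.2 ∧ q.1.toNat < g.length ∧ q.2.toNat < (g.getD q.1.toNat []).length) :
    pvE (ps.foldl (fun g q => pvSetCell g q.1 q.2 1) g) i j
      = if ((i : Int), (j : Int)) ∈ ps then 1 else pvE g i j := by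
  induction ps generalizing g with
  | nil => simp
  | cons q t ih =>
    have hq := hps q List.mem_cons_self
    have hps' : ∀ x ∈ t, 0 ≤ x.1 ∧ 0 ≤ x.2 ∧ x.1.toNat < (pvSetCell g q.1 q.2 1).length ∧
        x.2.toNat < ((pvSetCell g q.1 q.2 1).getD x.1.toNat []).length := by
      intro x hx
      have hb := hps x (List.mem_cons_of_mem _ hx)
      rw [pv_setCell_length, pv_setCell_rowlen]
      exact hb
    rw [List.foldl_cons, ih _ hps']
    have hstep := pv_setCell_entry g q.1 q.2 i j hq.1 hq.2.1
    by_cases hmt : ((i : Int), (j : Int)) ∈ t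
    · simp [hmt, List.mem_cons_of_mem _ hmt]
    · by_cases heq : ((i : Int), (j : Int)) = q
      · have h1 : q.1 = (i : Int) := by rw [← heq]
        have h2 : q.2 = (j : Int) := by rw [← heq]
        have hti : q.1.toNat = i := by omega
        have htj : q.2.toNat = j := by omega
        rw [if_neg hmt, hstep,
          if_pos ⟨h1, h2, by rw [← hti]; exact hq.2.2.1, by rw [← htj, ← hti]; exact hq.2.2.2⟩,
          if_pos (List.mem_cons.2 (Or.inl heq))]
      · have hcond : ¬ (q.1 = (i : Int) ∧ q.2 = (j : Int) ∧ i < g.length ∧ j < (g.getD i []).length) := by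
          rintro ⟨h1, h2, -⟩
          exact heq (by rw [← h1, ← h2])
        have hnm : ¬ ((i : Int), (j : Int)) ∈ q :: t := by
          intro hmem
          rcases List.mem_cons.1 hmem with h | h
          · exact heq h
          · exact hmt h
        rw [if_neg hmt, hstep, if_neg hcond, if_neg hnm]


theorem pv_map_const {α β : Type} (l : List α) (b : β) :
    l.map (fun _ => b) = List.replicate l.length b := by
  induction l with
  | nil => rfl
  | cons x t ih => simp [ih, List.replicate_succ]

theorem pv_E_replicate (H W : Nat) (i j : Nat) :
    pvE (List.replicate H (List.replicate W (0 : Int))) i j = 0 := by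
  simp only [pvE, List.getD_eq_getElem?_getD, List.getElem?_replicate]
  split_ifs <;> simp

theorem pv_getD_replicate {α : Type} (n : Nat) (a : α) (i : Nat) (d : α) (h : i < n) :
    (List.replicate n a).getD i d = a := by
  simp [List.getD_eq_getElem?_getD, h]

theorem pv_main (p : Int × Int) (rest : List (Int × Int)) :
    cells_to_shape (p :: rest) = cells_to_shape_alt (p :: rest) := by
  have hne : (p :: rest : List (Int × Int)) ≠ [] := List.cons_ne_nil _ _
  simp only [cells_to_shape, cells_to_shape_alt, if_neg hne, List.map_cons,
    PySem.List.min?_id_cons, Option.getD_some, pv_fold4]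
  set Rmin := (rest.map Prod.fst).foldl min p.1 with hRmin
  set Cmin := (rest.map Prod.snd).foldl min p.2 with hCmin
  set Rmax := (rest.map Prod.fst).foldl max p.1 with hRmax
  set Cmax := (rest.map Prod.snd).foldl max p.2 with hCmax
  set norm := PySem.Set.ofList ((p.1 - Rmin, p.2 - Cmin) :: rest.map (fun q => (q.1 - Rmin, q.2 - Cmin))) with hnorm
  have hmemnorm : ∀ y : Int × Int, y ∈ norm ↔ ∃ q ∈ p :: rest, (q.1 - Rmin, q.2 - Cmin) = y := by
    intro y
    rw [hnorm, PySem.Set.mem_ofList]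
    constructor
    · intro hy
      rcases List.mem_cons.1 hy with h | h
      · exact ⟨p, List.mem_cons_self, h.symm⟩
      · obtain ⟨q, hq, hqe⟩ := List.mem_map.1 h
        exact ⟨q, List.mem_cons_of_mem _ hq, hqe⟩
    · rintro ⟨q, hq, rfl⟩
      rcases List.mem_cons.1 hq with rfl | hq'
      · exact List.mem_cons_self
      · exact List.mem_cons_of_mem _ (List.mem_map.2 ⟨q, hq', rfl⟩)
  have hfst_mem : ∀ q ∈ p :: rest, q.1 ∈ p.1 :: rest.map Prod.fst := by
    intro q hq
    rcases List.mem_cons.1 hq with rfl | hq'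
    · exact List.mem_cons_self
    · exact List.mem_cons_of_mem _ (List.mem_map.2 ⟨q, hq', rfl⟩)
  have hsnd_mem : ∀ q ∈ p :: rest, q.2 ∈ p.2 :: rest.map Prod.snd := by
    intro q hq
    rcases List.mem_cons.1 hq with rfl | hq'
    · exact List.mem_cons_self
    · exact List.mem_cons_of_mem _ (List.mem_map.2 ⟨q, hq', rfl⟩)
  have hRmin_le : ∀ q ∈ p :: rest, Rmin ≤ q.1 := fun q hq =>
    pv_foldl_min_le (rest.map Prod.fst) p.1 q.1 (hfst_mem q hq)
  have hCmin_le : ∀ q ∈ p :: rest, Cmin ≤ q.2 := fun q hq =>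
    pv_foldl_min_le (rest.map Prod.snd) p.2 q.2 (hsnd_mem q hq)
  have hle_Rmax : ∀ q ∈ p :: rest, q.1 ≤ Rmax := fun q hq =>
    pv_le_foldl_max (rest.map Prod.fst) p.1 q.1 (hfst_mem q hq)
  have hle_Cmax : ∀ q ∈ p :: rest, q.2 ≤ Cmax := fun q hq =>
    pv_le_foldl_max (rest.map Prod.snd) p.2 q.2 (hsnd_mem q hq)
  have hRmax_mem : ∃ q ∈ p :: rest, q.1 = Rmax := by
    rcases List.mem_cons.1 (pv_foldl_max_mem (rest.map Prod.fst) p.1) with h | h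
    · exact ⟨p, List.mem_cons_self, h.symm⟩
    · obtain ⟨q, hq, hqe⟩ := List.mem_map.1 h
      exact ⟨q, List.mem_cons_of_mem _ hq, hqe⟩
  have hCmax_mem : ∃ q ∈ p :: rest, q.2 = Cmax := by
    rcases List.mem_cons.1 (pv_foldl_max_mem (rest.map Prod.snd) p.2) with h | h
    · exact ⟨p, List.mem_cons_self, h.symm⟩
    · obtain ⟨q, hq, hqe⟩ := List.mem_map.1 h
      exact ⟨q, List.mem_cons_of_mem _ hq, hqe⟩
  have e_h : (PySem.List.max? (norm.map Prod.fst) (fun x => x)).getD 0 = Rmax - Rmin := by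
    apply pv_max?_eq_of
    · obtain ⟨q, hq, hqe⟩ := hRmax_mem
      exact List.mem_map.2 ⟨(q.1 - Rmin, q.2 - Cmin), (hmemnorm _).2 ⟨q, hq, rfl⟩, by rw [hqe]⟩
    · intro y hy
      obtain ⟨z, hz, rfl⟩ := List.mem_map.1 hy
      obtain ⟨q, hq, hqe⟩ := (hmemnorm z).1 hz
      have h1 := hle_Rmax q hq
      have h2 : q.1 - Rmin = z.1 := by rw [← hqe]
      omega
  have e_w : (PySem.List.max? (norm.map Prod.snd) (fun x => x)).getD 0 = Cmax - Cmin := by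
    apply pv_max?_eq_of
    · obtain ⟨q, hq, hqe⟩ := hCmax_mem
      exact List.mem_map.2 ⟨(q.1 - Rmin, q.2 - Cmin), (hmemnorm _).2 ⟨q, hq, rfl⟩, by rw [hqe]⟩
    · intro y hy
      obtain ⟨z, hz, rfl⟩ := List.mem_map.1 hy
      obtain ⟨q, hq, hqe⟩ := (hmemnorm z).1 hz
      have h1 := hle_Cmax q hq
      have h2 : q.2 - Cmin = z.2 := by rw [← hqe]
      omega
  rw [e_h, e_w]
  have hZ : (PySem.List.pyRange 0 (Rmax - Rmin + 1)).map
      (fun _ => (PySem.List.pyRange 0 (Cmax - Cmin + 1)).map (fun _ => (0 : Int)))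
      = List.replicate (Rmax - Rmin + 1).toNat (List.replicate (Cmax - Cmin + 1).toNat 0) := by
    rw [pv_map_const, pv_map_const, PySem.List.length_pyRange_one, PySem.List.length_pyRange_one]
    norm_num
  rw [hZ]
  set Ht := (Rmax - Rmin + 1).toNat with hHt
  set Wt := (Cmax - Cmin + 1).toNat with hWt
  set Z := List.replicate Ht (List.replicate Wt (0 : Int)) with hZdef
  have hbounds : ∀ q ∈ norm, 0 ≤ q.1 ∧ 0 ≤ q.2 ∧ q.1.toNat < Z.length ∧
      q.2.toNat < (Z.getD q.1.toNat []).length := by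
    intro q hq
    obtain ⟨x, hx, hxe⟩ := (hmemnorm q).1 hq
    have h1 := hRmin_le x hx
    have h2 := hle_Rmax x hx
    have h3 := hCmin_le x hx
    have h4 := hle_Cmax x hx
    have hq1 : x.1 - Rmin = q.1 := by rw [← hxe]
    have hq2 : x.2 - Cmin = q.2 := by rw [← hxe]
    have hlt1 : q.1.toNat < Ht := by rw [hHt]; omega
    have hrow : Z.getD q.1.toNat [] = List.replicate Wt 0 := by
      rw [hZdef, pv_getD_replicate _ _ _ _ hlt1]
    refine ⟨by omega, by omega, ?_, ?_⟩
    · rw [hZdef, List.length_replicate]; exact hlt1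
    · rw [hrow, List.length_replicate, hWt]; omega
  apply List.ext_getElem
  · rw [pv_scatter_length, hZdef]
    simp
  · intro i hi1 hi2
    have hiH : i < Ht := by
      rw [pv_scatter_length, hZdef, List.length_replicate] at hi1; exact hi1
    have hrowlen : (List.foldl (fun g q => pvSetCell g q.1 q.2 1) Z norm)[i] = 
        (List.foldl (fun g q => pvSetCell g q.1 q.2 1) Z norm).getD i [] := by
      rw [List.getD_eq_getElem _ _ hi1]
    apply List.ext_getElem
    · rw [hrowlen, pv_scatter_rowlen, hZdef, pv_getD_replicate _ _ _ _ hiH,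
        List.length_replicate]
      simp
    · intro j hj1 hj2
      have hjW : j < Wt := by
        rw [hrowlen, pv_scatter_rowlen, hZdef, pv_getD_replicate _ _ _ _ hiH,
          List.length_replicate] at hj1
        exact hj1
      have hL : (List.foldl (fun g q => pvSetCell g q.1 q.2 1) Z norm)[i][j]
          = pvE (List.foldl (fun g q => pvSetCell g q.1 q.2 1) Z norm) i j := by
        rw [pvE, List.getD_eq_getElem _ _ hi1, List.getD_eq_getElem _ _ hj1]
      rw [hL, pv_scatter_entry norm Z i j hbounds]
      have hz0 : pvE Z i j = 0 := by rw [hZdef]; exact pv_E_replicate Ht Wt i j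
      rw [hz0]
      have hiff : (((i : Int), (j : Int)) ∈ norm) ↔
          (((i : Int) + Rmin, (j : Int) + Cmin) ∈ p :: rest) := by
        rw [hmemnorm]
        constructor
        · rintro ⟨q, hq, hqe⟩
          have h1 : q.1 - Rmin = (i : Int) := congrArg Prod.fst hqe
          have h2 : q.2 - Cmin = (j : Int) := congrArg Prod.snd hqe
          have : ((i : Int) + Rmin, (j : Int) + Cmin) = q := Prod.ext (by omega) (by omega)
          rw [this]; exact hq
        · intro hmem
          exact ⟨_, hmem, Prod.ext (by simp) (by simp)⟩
      simp only [List.getElem_map, List.getElem_range]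
      rw [if_congr hiff rfl rfl]

-- ===== VERDICT (by name: the statement is the Claim_ definition above) =====
theorem cells_to_shape_spec : Claim_equal_cells_to_shape := by
  unfold Claim_equal_cells_to_shape
  intro cells _
  unfold Spec_cells_to_shape
  cases cells with
  | nil => rfl
  | cons p rest => exact pv_main p rest
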